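-- pv_equiv track=rewrite | github.com/Secuter/ColorConversion | tools/pdf-import/src/parse_sources.py | normalize_table_rows
-- ===== SOURCE A (Python) =====
-- def normalize_table_rows(rows: list[list[str]]) -> list[list[str]]:
--     cleaned_rows: list[list[str]] = []
--     for row in rows:
--         cleaned = [str(cell or "").replace("\n", " ").strip() for cell in row]
--         if any(cleaned):
--             cleaned_rows.append(cleaned)
--
--     if not cleaned_rows:
--         return []
--
--     width = max(len(row) for row in cleaned_rows)
--     normalized = [row + [""] * (width - len(row)) for row in cleaned_rows]
--     return normalized
-- ===== SOURCE B (Python) =====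
-- import itertools
--
--
-- def _clean_cell(cell):
--     return str(cell or "").replace("\n", " ").strip()
--
--
-- def normalize_table_rows(rows: list[list[str]]) -> list[list[str]]:
--     cleaned_rows = [c for c in (list(map(_clean_cell, row)) for row in rows) if any(c)]
--     if not cleaned_rows:
--         return []
--     # pad column-wise: transpose the ragged rows into uniform columns, then back
--     cols = itertools.zip_longest(*cleaned_rows, fillvalue="")
--     return [list(t) for t in zip(*cols)]
-- ===== Notes on version B (the rewrite author's own statement) =====
-- stated objective: alternative
-- what changed: The per-row padding phase (max width, then append width-len filler cells to each row) is replaced by a column-wise transpose: zip_longest turns the ragged rows into uniform columns with '' fill, and zip transposes them back, so no width arithmetic or filler lists are computed.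
import Mathlib
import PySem

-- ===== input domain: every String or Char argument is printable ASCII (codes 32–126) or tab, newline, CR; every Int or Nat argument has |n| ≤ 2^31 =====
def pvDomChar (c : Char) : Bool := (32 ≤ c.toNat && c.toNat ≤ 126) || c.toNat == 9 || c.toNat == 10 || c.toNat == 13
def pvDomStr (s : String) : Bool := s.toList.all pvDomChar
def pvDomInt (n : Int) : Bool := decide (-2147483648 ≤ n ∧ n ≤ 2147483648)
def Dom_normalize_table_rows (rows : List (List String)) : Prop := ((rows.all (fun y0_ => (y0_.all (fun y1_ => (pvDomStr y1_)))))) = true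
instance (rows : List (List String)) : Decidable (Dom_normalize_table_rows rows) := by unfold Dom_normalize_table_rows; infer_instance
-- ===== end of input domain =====

-- B replaces A's per-row padding (max width + filler append) by a column-wise transpose
-- (zip_longest into uniform columns, zip back); same return value, alternative structure.

-- ===== PORT A =====
-- str(cell or "").replace("\n", " ").strip()  (cell is a str, so 'str(cell or "")' is cell itself)
def pvClean (cell : String) : String := PySem.Str.strip (PySem.Str.replace cell "\n" " ")

-- any(cleaned): a str is truthy iff nonempty
def pvTruthyRow (c : List String) : Bool := c.any (fun s => !s.toList.isEmpty)

def normalize_table_rows (rows : List (List String)) : List (List String) :=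
  let cleaned_rows := rows.foldl (fun acc row =>
      let cleaned := row.map pvClean
      if pvTruthyRow cleaned then acc ++ [cleaned] else acc) []
  if cleaned_rows.isEmpty then []
  else
    match PySem.List.max? (cleaned_rows.map List.length) (fun y => y) with
    | none => []  -- unreachable: cleaned_rows nonempty
    | some width => cleaned_rows.map (fun row => row ++ List.replicate (width - row.length) "")

-- ===== PORT B =====
-- itertools.zip_longest(*rss, fillvalue=""): runs for max-length steps, defaulting exhausted rows to ""
def pvZipLongestAux : Nat → List (List String) → List (List String)
  | 0, _ => []
  | n+1, rss => rss.map (fun r => r.headD "") :: pvZipLongestAux n (rss.map List.tail)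

def pvZipLongest (rss : List (List String)) : List (List String) :=
  pvZipLongestAux ((rss.map List.length).foldl max 0) rss

-- zip(*cols): runs for min-length steps (fuel = exact number of tuples zip yields)
def pvZipTAux : Nat → List (List String) → List (List String)
  | 0, _ => []
  | n+1, cols => cols.map (fun c => c.headD "") :: pvZipTAux n (cols.map List.tail)

def pvZipT (cols : List (List String)) : List (List String) :=
  pvZipTAux (((cols.map List.length).min?).getD 0) cols

def normalize_table_rows_alt (rows : List (List String)) : List (List String) :=
  let cleaned_rows := ((rows.map (fun row => row.map pvClean)).filter pvTruthyRow)
  if cleaned_rows.isEmpty then []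
  else pvZipT (pvZipLongest cleaned_rows)

-- ===== PRECONDITION & SPEC =====
def Spec_normalize_table_rows (rows : List (List String)) (out : List (List String)) : Prop := out = normalize_table_rows_alt rows
instance (rows : List (List String)) (out : List (List String)) : Decidable (Spec_normalize_table_rows rows out) := by unfold Spec_normalize_table_rows; infer_instance

-- ===== CLAIM (what is proved, stated in full; the proofs are below) =====
def Claim_equal_normalize_table_rows : Prop := ∀ (rows : List (List String)), Dom_normalize_table_rows rows → Spec_normalize_table_rows rows (normalize_table_rows rows)

-- ===== LEMMAS AND PROOFS =====

lemma zipLongestAux_eq (n : Nat) : ∀ rss : List (List String),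
    pvZipLongestAux n rss = (List.range n).map (fun j => rss.map (fun r => r.getD j "")) := by
  induction n with
  | zero => intro rss; simp [pvZipLongestAux]
  | succ n ih =>
    intro rss
    rw [pvZipLongestAux, ih, List.range_succ_eq_map]
    simp only [List.map_cons, List.map_map]
    congr 1
    · exact List.map_congr_left (fun a _ => by cases a <;> rfl)
    · exact List.map_congr_left (fun j _ => by simp [Function.comp_def])

lemma zipTAux_eq (n : Nat) : ∀ cols : List (List String),
    pvZipTAux n cols = (List.range n).map (fun i => cols.map (fun c => c.getD i "")) := by
  induction n with
  | zero => intro cols; simp [pvZipTAux]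
  | succ n ih =>
    intro cols
    rw [pvZipTAux, ih, List.range_succ_eq_map]
    simp only [List.map_cons, List.map_map]
    congr 1
    · exact List.map_congr_left (fun a _ => by cases a <;> rfl)
    · exact List.map_congr_left (fun j _ => by simp [Function.comp_def])

lemma pad_eq (r : List String) : ∀ W : Nat, r.length ≤ W →
    (List.range W).map (fun j => r.getD j "") = r ++ List.replicate (W - r.length) "" := by
  induction r with
  | nil => intro W _; simp [List.getD]
  | cons a t ih =>
    intro W hW
    cases W with
    | zero => simp at hW
    | succ W =>
      rw [List.range_succ_eq_map]
      simp only [List.map_cons, List.map_map]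
      rw [show ((fun j => (a :: t).getD j "") ∘ Nat.succ) = (fun j => t.getD j "") from rfl]
      simp only [List.getD, List.getElem?_cons_zero, Option.getD_some, List.length_cons,
        Nat.succ_sub_succ, List.cons_append, List.cons.injEq, true_and]
      simpa [List.getD] using ih W (by simpa using hW)

lemma foldl_min_self (k n : Nat) : (List.replicate k n).foldl min n = n := by
  induction k with
  | zero => rfl
  | succ k ih => simp [List.replicate_succ, ih]

lemma min?_replicate_succ (k n : Nat) : (List.replicate (k+1) n).min? = some n := by
  simp [List.replicate_succ, List.min?, foldl_min_self]

lemma getD_map_lt {α β : Type} [Inhabited β] (l : List α) (g : α → β) (i : Nat) (d : β)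
    (h : i < l.length) : (l.map g).getD i d = g l[i] := by
  simp [List.getD, List.getElem?_eq_getElem h]

lemma cleaned_eq (rows : List (List String)) :
    rows.foldl (fun acc row =>
      let cleaned := row.map pvClean
      if pvTruthyRow cleaned then acc ++ [cleaned] else acc) [] =
    ((rows.map (fun row => row.map pvClean)).filter pvTruthyRow) := by
  rw [List.filter_map]
  simpa using PySem.List.foldl_append_if
    (l := rows) (acc := ([] : List (List String)))
    (p := fun row => pvTruthyRow (row.map pvClean)) (f := fun row => row.map pvClean)

lemma zipT_zipLongestAux (L : List (List String)) (W : Nat) (hW1 : 1 ≤ W)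
    (hle : ∀ r ∈ L, r.length ≤ W) :
    pvZipT (pvZipLongestAux W L) = L.map (fun row => row ++ List.replicate (W - row.length) "") := by
  rw [zipLongestAux_eq]
  have hcols : ((List.range W).map (fun j => L.map (fun r => r.getD j ""))).map List.length
      = List.replicate W L.length := by
    simp [List.map_map, Function.comp_def, List.map_const']
  rw [pvZipT, hcols]
  cases W with
  | zero => omega
  | succ W' =>
    rw [min?_replicate_succ, Option.getD_some, zipTAux_eq]
    apply List.ext_getElem
    · simp
    · intro i h1 h2
      simp only [List.getElem_map, List.getElem_range, List.map_map, Function.comp_def]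
      have hil : i < L.length := by simpa using h1
      have hfun : (fun j => (L.map (fun r => r.getD j "")).getD i "") =
          (fun j => (L[i]).getD j "") := by
        funext j
        exact getD_map_lt L (fun r => r.getD j "") i "" hil
      rw [hfun, pad_eq _ _ (hle _ (List.getElem_mem hil))]

lemma core_eq (cr : List (List String)) (htr : ∀ r ∈ cr, pvTruthyRow r = true) :
    (if cr.isEmpty then []
     else
       match PySem.List.max? (cr.map List.length) (fun y => y) with
       | none => []
       | some width => cr.map (fun row => row ++ List.replicate (width - row.length) "")) =
    (if cr.isEmpty then [] else pvZipT (pvZipLongest cr)) := by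
  cases cr with
  | nil => rfl
  | cons c t =>
    simp only [List.isEmpty_cons, if_neg Bool.false_ne_true, List.map_cons]
    rw [PySem.List.max?_id_cons]
    have hle : ∀ r ∈ (c :: t), r.length ≤ (t.map List.length).foldl max c.length := by
      intro r hr
      rcases List.mem_cons.mp hr with h | h
      · rw [h]; exact (PySem.List.le_foldl_max (t.map List.length) c.length).1
      · exact (PySem.List.le_foldl_max (t.map List.length) c.length).2 _ (List.mem_map_of_mem h)
    have hc1 : 1 ≤ c.length := by
      have := htr c List.mem_cons_self
      cases c with
      | nil => simp [pvTruthyRow] at this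
      | cons _ _ => simp
    have hW1 : 1 ≤ (t.map List.length).foldl max c.length :=
      le_trans hc1 ((PySem.List.le_foldl_max (t.map List.length) c.length).1)
    have hW0 : ((c :: t).map List.length).foldl max 0 = (t.map List.length).foldl max c.length := by
      simp [List.foldl_cons]
    rw [pvZipLongest, hW0, zipT_zipLongestAux _ _ hW1 hle]
    simp

-- ===== VERDICT (by name: the statement is the Claim_ definition above) =====
theorem normalize_table_rows_spec : Claim_equal_normalize_table_rows := by
  intro rows _
  unfold Spec_normalize_table_rows normalize_table_rows normalize_table_rows_alt
  rw [cleaned_eq]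
  exact core_eq _ (fun r hr => List.of_mem_filter hr)
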